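-- pv_equiv track=rewrite | github.com/metonline/mgbric | compute_dd_tables.py | pbn_to_dds
-- ===== SOURCE A (Python) =====
-- def pbn_to_dds(pbn_string):
--     """Convert PBN string to DDS format."""
--     # PBN format: "SQ864HJ97DT3CA842" means S=Q864, H=J97, D=T3, C=A842
--     suits = {'S': 0, 'H': 1, 'D': 2, 'C': 3}
--
--     holdings = {'S': '', 'H': '', 'D': '', 'C': ''}
--     current_suit = None
--
--     for char in pbn_string:
--         if char in suits:
--             current_suit = char
--         else:
--             if current_suit:
--                 holdings[current_suit] += char
--
--     # Fill empty suits with dashes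
--     for suit in holdings:
--         if not holdings[suit]:
--             holdings[suit] = '-'
--
--     return holdings
-- ===== SOURCE B (Python) =====
-- def pbn_to_dds(pbn_string):
--     """Convert PBN string to DDS format."""
--     def suit_holding(suit):
--         cards = []
--         active = False
--         for ch in pbn_string:
--             if ch in 'SHDC':
--                 active = (ch == suit)
--             elif active:
--                 cards.append(ch)
--         return ''.join(cards) or '-'
--     return {suit: suit_holding(suit) for suit in 'SHDC'}
-- ===== Notes on version B (the rewrite author's own statement) =====
-- stated objective: alternative
-- what changed: Replaces A's single pass that mutates a shared holdings dict via a current-suit register (plus a second dash-filling pass) with four independent per-suit scans, each using only a boolean flag and a card buffer joined at the end, assembled by a comprehension over the four suit letters.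
import Mathlib
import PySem

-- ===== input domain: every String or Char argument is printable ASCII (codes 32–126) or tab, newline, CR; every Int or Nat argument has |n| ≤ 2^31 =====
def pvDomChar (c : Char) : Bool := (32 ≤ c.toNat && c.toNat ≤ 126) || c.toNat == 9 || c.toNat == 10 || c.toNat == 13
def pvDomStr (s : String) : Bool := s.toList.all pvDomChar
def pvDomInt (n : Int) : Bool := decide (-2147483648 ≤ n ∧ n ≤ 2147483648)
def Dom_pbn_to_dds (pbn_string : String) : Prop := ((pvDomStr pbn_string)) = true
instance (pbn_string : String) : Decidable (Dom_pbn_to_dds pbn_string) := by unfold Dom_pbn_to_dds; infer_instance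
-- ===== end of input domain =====

-- B replaces A's single pass with a mutable dict and a current-suit register by four
-- independent per-suit scans (objective: alternative; same behaviour, proven equal for all inputs).

-- ===== PORT A =====
-- suits = {'S': 0, 'H': 1, 'D': 2, 'C': 3}
def pvSuits : PySem.Dict String Int := PySem.Dict.ofList [("S", 0), ("H", 1), ("D", 2), ("C", 3)]

-- one iteration of A's "for char in pbn_string" loop; state = (current_suit, holdings).
-- Holdings values are kept as List Char (the string being built by +=) and converted by
-- String.ofList on return; "if current_suit:" is exact as the Option match since
-- current_suit is only ever None or a 1-char (truthy) string.
def pvStepA (st : Option String × PySem.Dict String (List Char)) (ch : Char) :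
    Option String × PySem.Dict String (List Char) :=
  if pvSuits.contains (String.ofList [ch]) then (some (String.ofList [ch]), st.2)
  else
    match st.1 with
    | some cur => (st.1, st.2.modify cur [] (fun v => v ++ [ch]))
    | none => st

def pbn_to_dds (pbn_string : String) : List (String × String) :=
  let holdings0 : PySem.Dict String (List Char) :=
    PySem.Dict.ofList [("S", []), ("H", []), ("D", []), ("C", [])]
  let r := pbn_string.toList.foldl pvStepA (none, holdings0)
  -- for suit in holdings: if not holdings[suit]: holdings[suit] = '-'
  let filled := r.2.keys.foldl
    (fun d k => if d.getD k [] = [] then d.insert k ['-'] else d) r.2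
  filled.items.map (fun kv => (kv.1, String.ofList kv.2))

-- ===== PORT B =====
def pvIsSuit (ch : Char) : Bool := ch == 'S' || ch == 'H' || ch == 'D' || ch == 'C'  -- ch in 'SHDC'

-- B's helper suit_holding: one scan with an 'active' flag, cards buffer joined at the end
def pvSuitHolding (pbn_string : String) (suit : Char) : String :=
  let r := pbn_string.toList.foldl
    (fun (st : Bool × List Char) ch =>
      if pvIsSuit ch then (ch == suit, st.2)
      else if st.1 then (st.1, st.2 ++ [ch]) else st)
    (false, [])
  if r.2 = [] then "-" else String.ofList r.2

def pbn_to_dds_alt (pbn_string : String) : List (String × String) :=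
  ['S', 'H', 'D', 'C'].map (fun s => (String.ofList [s], pvSuitHolding pbn_string s))

-- ===== PRECONDITION & SPEC =====
def Spec_pbn_to_dds (pbn_string : String) (out : List (String × String)) : Prop := out = pbn_to_dds_alt pbn_string
instance (pbn_string : String) (out : List (String × String)) : Decidable (Spec_pbn_to_dds pbn_string out) := by unfold Spec_pbn_to_dds; infer_instance

-- ===== CLAIM (what is proved, stated in full; the proofs are below) =====
def Claim_equal_pbn_to_dds : Prop := ∀ (pbn_string : String), Dom_pbn_to_dds pbn_string → Spec_pbn_to_dds pbn_string (pbn_to_dds pbn_string)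

-- ===== LEMMAS AND PROOFS =====

-- common normal form: the characters collected for suit x when scanning the PBN characters
-- with flag b = "the current suit is x"
def pvSpine (x : Char) (b : Bool) : List Char → List Char
  | [] => []
  | c :: cs =>
    if pvIsSuit c then pvSpine x (c == x) cs
    else if b then c :: pvSpine x b cs else pvSpine x b cs

-- the current_suit register at the end of A's scan
def pvFin (cur : Option Char) : List Char → Option Char
  | [] => cur
  | c :: cs => if pvIsSuit c then pvFin (some c) cs else pvFin cur cs

-- A's holdings dict always has exactly the four suit keys, in insertion order
def pvMk4 (a b c d : List Char) : PySem.Dict String (List Char) :=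
  PySem.Dict.mk [("S", a), ("H", b), ("D", c), ("C", d)]

theorem ofList_inj_iff (l l' : List Char) : (String.ofList l = String.ofList l') ↔ l = l' := by
  constructor
  · intro h; simpa using congrArg String.toList h
  · intro h; rw [h]

theorem str_eq_ofList_iff (s : String) (l : List Char) : (s = String.ofList l) ↔ s.toList = l := by
  rw [← String.ofList_toList (s := s), ofList_inj_iff]; simp

theorem beq_ofList (s : String) (l : List Char) : (s == String.ofList l) = (s.toList == l) := by
  rw [Bool.eq_iff_iff]; simp only [beq_iff_eq, str_eq_ofList_iff]

-- "char in suits" is exactly "char in 'SHDC'"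
theorem pvContains_suits (e : Char) :
    pvSuits.contains (String.ofList [e]) = pvIsSuit e := by
  have h : (PySem.Dict.empty.update [("S", (0:Int)), ("H", 1), ("D", 2), ("C", 3)]).items
      = [("S", (0:Int)), ("H", 1), ("D", 2), ("C", 3)] := by decide
  simp only [PySem.Dict.contains, pvSuits, PySem.Dict.ofList, pvIsSuit, h, List.any_cons,
    List.any_nil, beq_ofList,
    show ("S":String).toList = ['S'] from by decide, show ("H":String).toList = ['H'] from by decide,
    show ("D":String).toList = ['D'] from by decide, show ("C":String).toList = ['C'] from by decide]
  rw [Bool.eq_iff_iff]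
  simp only [Bool.or_eq_true, beq_iff_eq, List.cons.injEq, and_true]
  tauto

-- B's per-suit scan accumulates exactly the spine
theorem pvLemB (cs : List Char) (x : Char) (b : Bool) (acc : List Char) :
    (cs.foldl (fun (st : Bool × List Char) ch =>
        if pvIsSuit ch then (ch == x, st.2)
        else if st.1 then (st.1, st.2 ++ [ch]) else st) (b, acc)).2
      = acc ++ pvSpine x b cs := by
  induction cs generalizing b acc with
  | nil => simp [pvSpine]
  | cons c cs ih =>
    by_cases h : pvIsSuit c
    · simp [pvSpine, h, ih]
    · by_cases hb : b <;> simp [pvSpine, h, hb, ih]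

theorem pvSuitHolding_eq (s : String) (x : Char) :
    pvSuitHolding s x
      = if pvSpine x false s.toList = [] then "-" else String.ofList (pvSpine x false s.toList) := by
  simp only [pvSuitHolding]
  rw [pvLemB s.toList x false []]
  simp

theorem pvLemA (cs : List Char) (cur : Option Char) (a b c d : List Char)
    (hcur : cur = none ∨ cur = some 'S' ∨ cur = some 'H' ∨ cur = some 'D' ∨ cur = some 'C') :
    cs.foldl pvStepA (cur.map (fun y => String.ofList [y]), pvMk4 a b c d)
      = ((pvFin cur cs).map (fun y => String.ofList [y]),
         pvMk4 (a ++ pvSpine 'S' (cur == some 'S') cs) (b ++ pvSpine 'H' (cur == some 'H') cs)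
               (c ++ pvSpine 'D' (cur == some 'D') cs) (d ++ pvSpine 'C' (cur == some 'C') cs)) := by
  induction cs generalizing cur a b c d with
  | nil => simp [pvFin, pvSpine]
  | cons e cs ih =>
    by_cases h : pvIsSuit e
    · have he : e = 'S' ∨ e = 'H' ∨ e = 'D' ∨ e = 'C' := by
        have := h; simp only [pvIsSuit, Bool.or_eq_true, beq_iff_eq] at this; tauto
      have step : pvStepA (cur.map (fun y => String.ofList [y]), pvMk4 a b c d) e
          = (some (String.ofList [e]), pvMk4 a b c d) := by
        simp [pvStepA, pvContains_suits, h]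
      rw [List.foldl_cons, step]
      have := ih (some e) a b c d (by tauto)
      simp only [Option.map_some] at this
      rw [this]
      simp [pvSpine, pvFin, h]
    · rcases hcur with rfl | rfl | rfl | rfl | rfl
      · rw [List.foldl_cons]
        have step : pvStepA ((none : Option Char).map (fun y => String.ofList [y]), pvMk4 a b c d) e
            = (none, pvMk4 a b c d) := by
          have hc : pvSuits.contains (String.ofList [e]) = false := by
            rw [pvContains_suits]; simpa using h
          simp [pvStepA, hc]
        have hI := ih none a b c d (by tauto)
        simp only [Option.map_none] at hI
        rw [step, hI]
        simp [pvSpine, pvFin, h]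
      · rw [List.foldl_cons]
        have step : pvStepA ((some 'S').map (fun y => String.ofList [y]), pvMk4 a b c d) e
            = (some (String.ofList ['S']), pvMk4 (a ++ [e]) b c d) := by
          have hc : pvSuits.contains (String.ofList [e]) = false := by
            rw [pvContains_suits]; simpa using h
          simp only [pvStepA]
          rw [hc]
          simp [pvMk4, show String.ofList ['S'] = "S" from rfl, PySem.Dict.modify,
            PySem.Dict.get?, PySem.Dict.getD, PySem.Dict.insert, PySem.Dict.contains]
        have hI := ih (some 'S') (a ++ [e]) b c d (by tauto)
        simp only [Option.map_some] at hI
        rw [step, hI]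
        simp [pvSpine, pvFin, h]
      · rw [List.foldl_cons]
        have step : pvStepA ((some 'H').map (fun y => String.ofList [y]), pvMk4 a b c d) e
            = (some (String.ofList ['H']), pvMk4 a (b ++ [e]) c d) := by
          have hc : pvSuits.contains (String.ofList [e]) = false := by
            rw [pvContains_suits]; simpa using h
          simp only [pvStepA]
          rw [hc]
          simp [pvMk4, show String.ofList ['H'] = "H" from rfl, PySem.Dict.modify,
            PySem.Dict.get?, PySem.Dict.getD, PySem.Dict.insert, PySem.Dict.contains]
        have hI := ih (some 'H') a (b ++ [e]) c d (by tauto)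
        simp only [Option.map_some] at hI
        rw [step, hI]
        simp [pvSpine, pvFin, h]
      · rw [List.foldl_cons]
        have step : pvStepA ((some 'D').map (fun y => String.ofList [y]), pvMk4 a b c d) e
            = (some (String.ofList ['D']), pvMk4 a b (c ++ [e]) d) := by
          have hc : pvSuits.contains (String.ofList [e]) = false := by
            rw [pvContains_suits]; simpa using h
          simp only [pvStepA]
          rw [hc]
          simp [pvMk4, show String.ofList ['D'] = "D" from rfl, PySem.Dict.modify,
            PySem.Dict.get?, PySem.Dict.getD, PySem.Dict.insert, PySem.Dict.contains]
        have hI := ih (some 'D') a b (c ++ [e]) d (by tauto)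
        simp only [Option.map_some] at hI
        rw [step, hI]
        simp [pvSpine, pvFin, h]
      · rw [List.foldl_cons]
        have step : pvStepA ((some 'C').map (fun y => String.ofList [y]), pvMk4 a b c d) e
            = (some (String.ofList ['C']), pvMk4 a b c (d ++ [e])) := by
          have hc : pvSuits.contains (String.ofList [e]) = false := by
            rw [pvContains_suits]; simpa using h
          simp only [pvStepA]
          rw [hc]
          simp [pvMk4, show String.ofList ['C'] = "C" from rfl, PySem.Dict.modify,
            PySem.Dict.get?, PySem.Dict.getD, PySem.Dict.insert, PySem.Dict.contains]
        have hI := ih (some 'C') a b c (d ++ [e]) (by tauto)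
        simp only [Option.map_some] at hI
        rw [step, hI]
        simp [pvSpine, pvFin, h]

-- the dash-filling pass over the four keys
theorem pvDash (w x y z : List Char) :
    ((pvMk4 w x y z).keys.foldl (fun d k => if d.getD k [] = [] then d.insert k ['-'] else d)
        (pvMk4 w x y z)).items
      = [("S", if w = [] then ['-'] else w), ("H", if x = [] then ['-'] else x),
         ("D", if y = [] then ['-'] else y), ("C", if z = [] then ['-'] else z)] := by
  have hk : (pvMk4 w x y z).keys = ["S", "H", "D", "C"] := by
    simp [pvMk4, PySem.Dict.keys]
  rw [hk]
  by_cases hw : w = [] <;> by_cases hx : x = [] <;> by_cases hy : y = [] <;> by_cases hz : z = [] <;>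
    simp [hw, hx, hy, hz, pvMk4, PySem.Dict.getD, PySem.Dict.get?, PySem.Dict.insert,
      PySem.Dict.contains, List.foldl]

-- ===== VERDICT (by name: the statement is the Claim_ definition above) =====
theorem pbn_to_dds_spec : Claim_equal_pbn_to_dds := by
  unfold Claim_equal_pbn_to_dds
  intro s _
  unfold Spec_pbn_to_dds
  simp only [pbn_to_dds, pbn_to_dds_alt]
  have h0 : (PySem.Dict.ofList [("S", ([]:List Char)), ("H", []), ("D", []), ("C", [])])
      = pvMk4 [] [] [] [] := by decide
  have hL := pvLemA s.toList none [] [] [] [] (Or.inl rfl)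
  simp only [Option.map_none, List.nil_append] at hL
  norm_num at hL
  rw [h0, hL, pvDash]
  simp only [List.map_cons, List.map_nil, pvSuitHolding_eq]
  by_cases hS : pvSpine 'S' false s.toList = [] <;>
    by_cases hH : pvSpine 'H' false s.toList = [] <;>
      by_cases hD : pvSpine 'D' false s.toList = [] <;>
        by_cases hC : pvSpine 'C' false s.toList = [] <;>
          simp [hS, hH, hD, hC]
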